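-- pv_equiv track=rewrite | github.com/ppwnr88/PPTextEditor | scripts/generate_app_icons.py | fit_to_square
-- ===== SOURCE A (Python) =====
-- def fit_to_square(width, height, pixels):
--     size = max(width, height)
--     x_offset = (size - width) // 2
--     y_offset = (size - height) // 2
--     square = [(255, 255, 255, 0)] * (size * size)
--
--     for y in range(height):
--         for x in range(width):
--             square[(y + y_offset) * size + x + x_offset] = pixels[y * width + x]
--
--     return size, size, square
-- ===== SOURCE B (Python) =====
-- def fit_to_square(width, height, pixels):
--     # Gather pass over destination indices instead of scatter-writes into a
--     # preallocated canvas: decode each flat index into (row, col) and decide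
--     # whether it falls inside the centered source rectangle.
--     size = max(width, height)
--     x_offset = (size - width) // 2
--     y_offset = (size - height) // 2
--     square = []
--     for i in range(size * size):
--         r, c = divmod(i, size)
--         if y_offset <= r < y_offset + height and x_offset <= c < x_offset + width:
--             square.append(pixels[(r - y_offset) * width + (c - x_offset)])
--         else:
--             square.append((255, 255, 255, 0))
--     return size, size, square
-- ===== Notes on version B (the rewrite author's own statement) =====
-- stated objective: alternative
-- what changed: B replaces A's preallocate-then-scatter (white canvas mutated by nested source-coordinate loops) with a single gather pass over destination indices that decodes each flat index into row/col and picks the source pixel or white.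
import Mathlib
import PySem

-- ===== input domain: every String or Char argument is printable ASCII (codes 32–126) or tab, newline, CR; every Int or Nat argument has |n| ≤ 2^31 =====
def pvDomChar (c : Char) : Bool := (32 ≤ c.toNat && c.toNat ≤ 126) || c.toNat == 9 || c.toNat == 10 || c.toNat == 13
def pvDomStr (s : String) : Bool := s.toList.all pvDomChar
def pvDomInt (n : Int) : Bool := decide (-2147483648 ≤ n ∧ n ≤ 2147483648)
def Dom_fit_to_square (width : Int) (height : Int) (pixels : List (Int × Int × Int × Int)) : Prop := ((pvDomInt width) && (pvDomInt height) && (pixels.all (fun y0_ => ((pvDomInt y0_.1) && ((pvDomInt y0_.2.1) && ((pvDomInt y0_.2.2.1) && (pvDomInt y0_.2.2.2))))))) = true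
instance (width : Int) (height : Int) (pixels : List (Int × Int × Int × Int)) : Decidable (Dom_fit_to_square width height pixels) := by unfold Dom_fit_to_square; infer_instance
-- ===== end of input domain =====

-- B replaces A's preallocate-then-scatter with a single gather pass over destination
-- indices (alternative decomposition, same O(size^2) cost; return value only).

-- ===== PORT A =====
-- pySetD/pyGetD are the total forms of square[i]=v / pixels[i]; every index they
-- receive is in range under Pre_fit_to_square (which excludes A's IndexError inputs).
def fit_to_square (width : Int) (height : Int) (pixels : List (Int × Int × Int × Int)) : Int × Int × (List (Int × Int × Int × Int)) :=
  let size := max width height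
  let x_offset := PySem.Int.floordiv (size - width) 2
  let y_offset := PySem.Int.floordiv (size - height) 2
  let square := PySem.List.pyRepeat [((255 : Int), (255 : Int), (255 : Int), (0 : Int))] (size * size)
  let square :=
    (PySem.List.pyRange 0 height 1).foldl (fun sq y =>
      (PySem.List.pyRange 0 width 1).foldl (fun sq x =>
        PySem.List.pySetD sq ((y + y_offset) * size + x + x_offset)
          (PySem.List.pyGetD pixels (y * width + x) ((255 : Int), (255 : Int), (255 : Int), (0 : Int)))) sq) square
  (size, size, square)

-- ===== PORT B =====
-- divmod(i, size) = (i // size, i % size); size = 0 only when the loop is empty,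
-- so the total floordiv/mod are exact on every executed iteration.
def fit_to_square_alt (width : Int) (height : Int) (pixels : List (Int × Int × Int × Int)) : Int × Int × (List (Int × Int × Int × Int)) :=
  let size := max width height
  let x_offset := PySem.Int.floordiv (size - width) 2
  let y_offset := PySem.Int.floordiv (size - height) 2
  let square :=
    (PySem.List.pyRange 0 (size * size) 1).foldl (fun sq i =>
      let r := PySem.Int.floordiv i size
      let c := PySem.Int.mod i size
      if y_offset ≤ r ∧ r < y_offset + height ∧ x_offset ≤ c ∧ c < x_offset + width then
        sq ++ [PySem.List.pyGetD pixels ((r - y_offset) * width + (c - x_offset)) ((255 : Int), (255 : Int), (255 : Int), (0 : Int))]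
      else
        sq ++ [((255 : Int), (255 : Int), (255 : Int), (0 : Int))]) ([] : List (Int × Int × Int × Int))
  (size, size, square)

-- ===== PRECONDITION & SPEC =====
-- Pre_ excludes exactly the inputs on which A raises IndexError: width > 0 and
-- height > 0 with fewer than width*height pixels. A returns on every other input.
def Pre_fit_to_square (width : Int) (height : Int) (pixels : List (Int × Int × Int × Int)) : Prop :=
  0 < width → 0 < height → width * height ≤ (pixels.length : Int)
instance (width : Int) (height : Int) (pixels : List (Int × Int × Int × Int)) : Decidable (Pre_fit_to_square width height pixels) := by unfold Pre_fit_to_square; infer_instance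

def pvWitness_fit_to_square : Int × Int × (List (Int × Int × Int × Int)) :=
  (2, 1, [(10, 20, 30, 40), (50, 60, 70, 80)])

def Spec_fit_to_square (width : Int) (height : Int) (pixels : List (Int × Int × Int × Int)) (out : Int × Int × (List (Int × Int × Int × Int))) : Prop := out = fit_to_square_alt width height pixels
instance (width : Int) (height : Int) (pixels : List (Int × Int × Int × Int)) (out : Int × Int × (List (Int × Int × Int × Int))) : Decidable (Spec_fit_to_square width height pixels out) := by unfold Spec_fit_to_square; infer_instance

-- ===== CLAIM (what is proved, stated in full; the proofs are below) =====
def Claim_equal_fit_to_square : Prop := ∀ (width : Int) (height : Int) (pixels : List (Int × Int × Int × Int)), Dom_fit_to_square width height pixels → Pre_fit_to_square width height pixels → Spec_fit_to_square width height pixels (fit_to_square width height pixels)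

-- ===== LEMMAS AND PROOFS =====

-- destination cell value of B's gather pass, as a standalone function of the flat index
def pvCell (width : Int) (height : Int) (pixels : List (Int × Int × Int × Int)) (i : Int) :
    Int × Int × Int × Int :=
  let size := max width height
  let x_offset := PySem.Int.floordiv (size - width) 2
  let y_offset := PySem.Int.floordiv (size - height) 2
  let r := PySem.Int.floordiv i size
  let c := PySem.Int.mod i size
  if y_offset ≤ r ∧ r < y_offset + height ∧ x_offset ≤ c ∧ c < x_offset + width then
    PySem.List.pyGetD pixels ((r - y_offset) * width + (c - x_offset)) ((255 : Int), (255 : Int), (255 : Int), (0 : Int))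
  else
    ((255 : Int), (255 : Int), (255 : Int), (0 : Int))

theorem pvAltEq (width : Int) (height : Int) (pixels : List (Int × Int × Int × Int)) :
    fit_to_square_alt width height pixels
      = (max width height, max width height,
         (PySem.List.pyRange 0 (max width height * max width height) 1).map
           (pvCell width height pixels)) := by
  simp only [fit_to_square_alt, Prod.mk.injEq]
  refine ⟨trivial, trivial, ?_⟩
  rw [show (fun (sq : List (Int × Int × Int × Int)) (i : Int) =>
        if PySem.Int.floordiv (max width height - height) 2 ≤ PySem.Int.floordiv i (max width height) ∧
            PySem.Int.floordiv i (max width height) < PySem.Int.floordiv (max width height - height) 2 + height ∧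
            PySem.Int.floordiv (max width height - width) 2 ≤ PySem.Int.mod i (max width height) ∧
            PySem.Int.mod i (max width height) < PySem.Int.floordiv (max width height - width) 2 + width then
          sq ++ [PySem.List.pyGetD pixels
            ((PySem.Int.floordiv i (max width height) - PySem.Int.floordiv (max width height - height) 2) * width +
              (PySem.Int.mod i (max width height) - PySem.Int.floordiv (max width height - width) 2))
            ((255 : Int), (255 : Int), (255 : Int), (0 : Int))]
        else sq ++ [((255 : Int), (255 : Int), (255 : Int), (0 : Int))])
      = (fun sq i => sq ++ [pvCell width height pixels i]) from
    funext fun sq => funext fun i => by simp only [pvCell]; split_ifs <;> rfl]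
  rw [PySem.List.foldl_append_singleton_eq_map, List.nil_append]

theorem pvFoldLen {α β : Type} (F : List α → β → List α)
    (h : ∀ s a, (F s a).length = s.length) :
    ∀ (l : List β) (sq : List α), (l.foldl F sq).length = sq.length := by
  intro l
  induction l with
  | nil => intro sq; rfl
  | cons x xs ih => intro sq; rw [List.foldl_cons, ih, h]

theorem pvFoldlConst {α β : Type} : ∀ (l : List β) (s : α), l.foldl (fun s _ => s) s = s := by
  intro l
  induction l with
  | nil => intro s; rfl
  | cons x xs ih => intro s; rw [List.foldl_cons]; exact ih s

theorem pvInnerGet {α : Type} (f : Nat → α) (p : Nat) :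
    ∀ (W : Nat) (sq : List α) (j : Nat), p + W ≤ sq.length →
      ((List.range W).foldl (fun s kx => s.set (p + kx) (f kx)) sq)[j]? =
        if p ≤ j ∧ j < p + W then some (f (j - p)) else sq[j]? := by
  intro W
  induction W with
  | zero =>
    intro sq j h
    rw [List.range_zero, List.foldl_nil, if_neg]
    omega
  | succ W ih =>
    intro sq j h
    rw [List.range_succ, List.foldl_append, List.foldl_cons, List.foldl_nil,
      List.getElem?_set, pvFoldLen _ (fun s a => List.length_set ..) _ sq,
      ih sq j (by omega)]
    by_cases hj : p + W = j
    · rw [if_pos hj, if_pos (show p + W < sq.length by omega),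
        if_pos (show p ≤ j ∧ j < p + (W + 1) by omega),
        show j - p = W by omega]
    · rw [if_neg hj]
      by_cases h2 : p ≤ j ∧ j < p + W
      · rw [if_pos h2, if_pos (show p ≤ j ∧ j < p + (W + 1) by omega)]
      · rw [if_neg h2, if_neg (show ¬(p ≤ j ∧ j < p + (W + 1)) by omega)]

theorem pvOuterGet {α : Type} (w0 : α) (px : List α) (W S xo yo : Nat)
    (hxo : xo + W ≤ S) (hS : 0 < S) :
    ∀ (k : Nat), yo + k ≤ S → ∀ (j : Nat), j < S * S →
      ((List.range k).foldl (fun sq ky =>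
          (List.range W).foldl
            (fun s kx => s.set ((ky + yo) * S + kx + xo) (px.getD (ky * W + kx) w0)) sq)
        (List.replicate (S * S) w0))[j]? =
      (if yo ≤ j / S ∧ j / S < yo + k ∧ xo ≤ j % S ∧ j % S < xo + W
       then some (px.getD ((j / S - yo) * W + (j % S - xo)) w0)
       else some w0) := by
  intro k
  induction k with
  | zero =>
    intro hk j hj
    rw [List.range_zero, List.foldl_nil, List.getElem?_replicate, if_pos hj, if_neg (by omega)]
  | succ k ih =>
    intro hk j hj
    rw [List.range_succ, List.foldl_append, List.foldl_cons, List.foldl_nil]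
    have hfun : (fun (s : List α) kx => s.set ((k + yo) * S + kx + xo) (px.getD (k * W + kx) w0))
        = (fun (s : List α) kx => s.set (((k + yo) * S + xo) + kx) ((fun kx => px.getD (k * W + kx) w0) kx)) := by
      funext s kx
      congr 1
      ring
    have hlen : ((List.range k).foldl (fun sq ky =>
          (List.range W).foldl
            (fun s kx => s.set ((ky + yo) * S + kx + xo) (px.getD (ky * W + kx) w0)) sq)
        (List.replicate (S * S) w0)).length = S * S := by
      rw [pvFoldLen _ (fun s a => pvFoldLen _ (fun s a => List.length_set ..) _ s) _ _,
        List.length_replicate]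
    have hmulS : (k + yo + 1) * S = (k + yo) * S + S := by ring
    have hple : (k + yo + 1) * S ≤ S * S := Nat.mul_le_mul_right S (by omega)
    rw [hfun, pvInnerGet _ _ _ _ j (by omega), ih (by omega) j hj]
    have hj' : S * (j / S) + j % S = j := Nat.div_add_mod j S
    have hr : j % S < S := Nat.mod_lt j hS
    have ht : S * (k + yo) = (k + yo) * S := by ring
    have hiff : ((k + yo) * S + xo ≤ j ∧ j < (k + yo) * S + xo + W) ↔
        (j / S = k + yo ∧ xo ≤ j % S ∧ j % S < xo + W) := by
      constructor
      · rintro ⟨h1, h2⟩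
        have hq : j / S = k + yo :=
          Nat.div_eq_of_lt_le (by omega) (by omega)
        rw [hq] at hj'
        exact ⟨hq, by omega, by omega⟩
      · rintro ⟨hq, h1, h2⟩
        rw [hq] at hj'
        omega
    by_cases hin : (k + yo) * S + xo ≤ j ∧ j < (k + yo) * S + xo + W
    · obtain ⟨hq, hc1, hc2⟩ := hiff.mp hin
      rw [if_pos hin, if_pos (by omega)]
      have h1 : j - ((k + yo) * S + xo) = j % S - xo := by
        rw [hq] at hj'; omega
      have h2 : j / S - yo = k := by omega
      rw [h1, h2]
    · rw [if_neg hin]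
      have hnot : ¬ (j / S = k + yo ∧ xo ≤ j % S ∧ j % S < xo + W) := fun h => hin (hiff.mpr h)
      by_cases hold : yo ≤ j / S ∧ j / S < yo + k ∧ xo ≤ j % S ∧ j % S < xo + W
      · rw [if_pos hold, if_pos (by omega)]
      · rw [if_neg hold, if_neg (by intro h; exact hold (by omega))]

theorem pvListsEq (width : Int) (height : Int) (pixels : List (Int × Int × Int × Int)) :
    fit_to_square width height pixels = fit_to_square_alt width height pixels := by
  rw [pvAltEq]
  simp only [fit_to_square, Prod.mk.injEq]
  refine ⟨trivial, trivial, ?_⟩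
  by_cases hh : height ≤ 0
  · rw [PySem.List.pyRange_one_eq_nil hh, List.foldl_nil, PySem.List.pyRepeat_singleton]
    symm
    rw [List.eq_replicate_iff]
    refine ⟨by rw [List.length_map, PySem.List.length_pyRange_one, sub_zero], ?_⟩
    intro b hb
    obtain ⟨i, hi, rfl⟩ := List.mem_map.mp hb
    simp only [pvCell]
    rw [if_neg]
    rintro ⟨h1, h2, -⟩
    omega
  · by_cases hw : width ≤ 0
    · simp only [PySem.List.pyRange_one_eq_nil hw, List.foldl_nil]
      rw [pvFoldlConst, PySem.List.pyRepeat_singleton]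
      symm
      rw [List.eq_replicate_iff]
      refine ⟨by rw [List.length_map, PySem.List.length_pyRange_one, sub_zero], ?_⟩
      intro b hb
      obtain ⟨i, hi, rfl⟩ := List.mem_map.mp hb
      simp only [pvCell]
      rw [if_neg]
      rintro ⟨-, -, h3, h4⟩
      omega
    · simp only [not_le] at hh hw
      obtain ⟨W, rfl⟩ : ∃ W : Nat, width = (W : Int) :=
        ⟨width.toNat, (Int.toNat_of_nonneg (by omega)).symm⟩
      obtain ⟨H, rfl⟩ : ∃ H : Nat, height = (H : Int) :=
        ⟨height.toNat, (Int.toNat_of_nonneg (by omega)).symm⟩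
      obtain ⟨S, hmax, hWS, hHS, hSpos⟩ :
          ∃ S : Nat, max ((W : Int)) ((H : Int)) = (S : Int) ∧ W ≤ S ∧ H ≤ S ∧ 0 < S :=
        ⟨max W H, (Nat.cast_max ..).symm, Nat.le_max_left .., Nat.le_max_right ..,
          by have : (0 : Int) < (W : Int) := hw; omega⟩
      rw [hmax]
      have hxo : PySem.Int.floordiv ((S : Int) - (W : Int)) 2 = (((S - W) / 2 : Nat) : Int) := by
        rw [PySem.Int.floordiv_eq_ediv_of_pos (by norm_num)]; omega
      have hyo : PySem.Int.floordiv ((S : Int) - (H : Int)) 2 = (((S - H) / 2 : Nat) : Int) := by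
        rw [PySem.Int.floordiv_eq_ediv_of_pos (by norm_num)]; omega
      rw [hxo, hyo, show ((S : Int) * (S : Int)) = ((S * S : Nat) : Int) from by push_cast; ring,
        PySem.List.pyRepeat_singleton, Int.toNat_natCast]
      simp only [PySem.List.pyRange_one, sub_zero, Int.toNat_natCast, List.foldl_map,
        List.map_map, zero_add]
      have hfun : (fun (sq : List (Int × Int × Int × Int)) (k : Nat) =>
            (List.range W).foldl
              (fun (s : List (Int × Int × Int × Int)) (kx : Nat) => PySem.List.pySetD s
                (((k : Int) + (((S - H) / 2 : Nat) : Int)) * (S : Int) + (kx : Int) + (((S - W) / 2 : Nat) : Int))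
                (PySem.List.pyGetD pixels ((k : Int) * (W : Int) + (kx : Int))
                  ((255 : Int), (255 : Int), (255 : Int), (0 : Int)))) sq)
          = (fun sq k =>
            (List.range W).foldl
              (fun s kx => s.set ((k + (S - H) / 2) * S + kx + (S - W) / 2)
                (pixels.getD (k * W + kx) ((255 : Int), (255 : Int), (255 : Int), (0 : Int)))) sq) := by
        funext sq k
        have hin : (fun (s : List (Int × Int × Int × Int)) (kx : Nat) => PySem.List.pySetD s
              (((k : Int) + (((S - H) / 2 : Nat) : Int)) * (S : Int) + (kx : Int) + (((S - W) / 2 : Nat) : Int))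
              (PySem.List.pyGetD pixels ((k : Int) * (W : Int) + (kx : Int))
                ((255 : Int), (255 : Int), (255 : Int), (0 : Int))))
            = (fun (s : List (Int × Int × Int × Int)) (kx : Nat) => s.set ((k + (S - H) / 2) * S + kx + (S - W) / 2)
              (pixels.getD (k * W + kx) ((255 : Int), (255 : Int), (255 : Int), (0 : Int)))) := by
          funext s kx
          rw [show ((k : Int) + (((S - H) / 2 : Nat) : Int)) * (S : Int) + (kx : Int) + (((S - W) / 2 : Nat) : Int)
                = (((k + (S - H) / 2) * S + kx + (S - W) / 2 : Nat) : Int) from by push_cast; ring,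
            PySem.List.pySetD_natCast,
            show (k : Int) * (W : Int) + (kx : Int) = ((k * W + kx : Nat) : Int) from by push_cast; ring,
            PySem.List.pyGetD_natCast]
        rw [hin]
      rw [hfun]
      apply List.ext_getElem?
      intro j
      by_cases hjlt : j < S * S
      · rw [pvOuterGet _ pixels W S ((S - W) / 2) ((S - H) / 2) (by omega) hSpos H (by omega) j hjlt,
          List.getElem?_map, List.getElem?_range hjlt]
        simp only [Option.map_some, Function.comp_apply, pvCell, hmax, hxo, hyo,
          PySem.Int.floordiv_natCast, PySem.Int.mod_natCast]
        by_cases hc : (S - H) / 2 ≤ j / S ∧ j / S < (S - H) / 2 + H ∧ (S - W) / 2 ≤ j % S ∧ j % S < (S - W) / 2 + W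
        · rw [if_pos hc, if_pos (by omega),
            show ((j / S : Nat) : Int) - (((S - H) / 2 : Nat) : Int) = ((j / S - (S - H) / 2 : Nat) : Int) from by omega,
            show ((j % S : Nat) : Int) - (((S - W) / 2 : Nat) : Int) = ((j % S - (S - W) / 2 : Nat) : Int) from by omega,
            show ((j / S - (S - H) / 2 : Nat) : Int) * (W : Int) + ((j % S - (S - W) / 2 : Nat) : Int)
              = (((j / S - (S - H) / 2) * W + (j % S - (S - W) / 2) : Nat) : Int) from by push_cast; ring,
            PySem.List.pyGetD_natCast]
        · rw [if_neg hc, if_neg (fun h => hc (by omega))]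
      · rw [List.getElem?_eq_none, List.getElem?_eq_none]
        · rw [List.length_map, List.length_range]; omega
        · rw [pvFoldLen _ (fun s a => pvFoldLen _ (fun s a => List.length_set ..) _ s) _ _,
            List.length_replicate]
          omega

-- ===== VERDICT (by name: the statement is the Claim_ definition above) =====
theorem fit_to_square_spec : Claim_equal_fit_to_square := by
  intro width height pixels _ _
  exact pvListsEq width height pixels
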